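-- pv_equiv track=rewrite | github.com/fernandobusta/CA117 | wordcomps_031.py | word_sort
-- ===== SOURCE A (Python) =====
-- def word_sort(words):
--     a = [word for word in words if len(word) == 17]
--     b = [word for word in words if len(word) >= 18]
--     #get words with 4 a's
--     c = []
--     for w in words:
--         counter = 0
--         for letter in w:
--             if letter == 'a' or letter == 'A':
--                 counter += 1
--         if counter == 4:
--             c.append(w)
--     #get 2 or more q's
--     d = []
--     for w in words:
--         counter = 0
--         for letter in w:
--             if letter == 'q' or letter == 'Q':
--                 counter += 1
--         if counter >= 2:
--             d.append(w)
--     e = [word for word in words if 'cie' in word]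
--     #anagrams of 'angle'
--     f = []
--     for w in words:
--         wl = w.lower()
--         if 'a' in wl and 'n' in wl and 'g' in wl and 'l' in wl and 'e' in wl and len(wl) == 5 and w != 'angle':
--             if w not in f:
--                 f.append(w)
--     return a, b, c, d, e, f
-- ===== SOURCE B (Python) =====
-- def word_sort(words):
--     a, b, c, d, e, f = [], [], [], [], [], []
--     for w in words:
--         n = len(w)
--         if n == 17:
--             a.append(w)
--         if n >= 18:
--             b.append(w)
--         if w.count('a') + w.count('A') == 4:
--             c.append(w)
--         if w.count('q') + w.count('Q') >= 2:
--             d.append(w)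
--         if 'cie' in w:
--             e.append(w)
--         if sorted(w.lower()) == ['a', 'e', 'g', 'l', 'n'] and w != 'angle' and w not in f:
--             f.append(w)
--     return a, b, c, d, e, f
-- ===== Notes on version B (the rewrite author's own statement) =====
-- stated objective: simpler
-- what changed: B makes a single pass over the word list updating all six result lists at once, replacing A's six separate traversals; the hand-written case-insensitive letter counters become str.count sums and the five membership tests plus length test for 'angle'-anagrams become one sorted-letters comparison.
import Mathlib
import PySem

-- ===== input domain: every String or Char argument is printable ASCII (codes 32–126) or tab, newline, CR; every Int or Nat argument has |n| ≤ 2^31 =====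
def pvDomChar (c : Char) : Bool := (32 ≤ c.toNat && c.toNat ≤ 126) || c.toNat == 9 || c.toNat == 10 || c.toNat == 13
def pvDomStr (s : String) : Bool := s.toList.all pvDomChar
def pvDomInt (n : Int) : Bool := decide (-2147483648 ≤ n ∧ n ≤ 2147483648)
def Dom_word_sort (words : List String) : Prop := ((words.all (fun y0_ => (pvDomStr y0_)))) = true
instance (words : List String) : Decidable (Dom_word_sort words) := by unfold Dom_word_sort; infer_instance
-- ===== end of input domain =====

-- B fuses A's six passes over the word list into one loop and replaces the hand-written
-- case counters and the five per-letter membership tests by str.count sums and a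
-- sorted-letters comparison (objective: simpler).

-- ===== PORT A =====
def word_sort (words : List String) : List String × List String × List String × List String × List String × List String :=
  let a := words.filter (fun word => PySem.Str.len word == 17)
  let b := words.filter (fun word => decide (18 ≤ PySem.Str.len word))
  let c := words.foldl (fun c w =>
    let counter := w.toList.foldl
      (fun counter letter => if letter == 'a' || letter == 'A' then counter + 1 else counter) (0 : Int)
    if counter == 4 then c ++ [w] else c) []
  let d := words.foldl (fun d w =>
    let counter := w.toList.foldl
      (fun counter letter => if letter == 'q' || letter == 'Q' then counter + 1 else counter) (0 : Int)
    if decide (2 ≤ counter) then d ++ [w] else d) []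
  let e := words.filter (fun word => PySem.Str.isIn "cie" word)
  let f := words.foldl (fun f w =>
    let wl := PySem.Str.lower w
    if PySem.Str.isIn "a" wl && PySem.Str.isIn "n" wl && PySem.Str.isIn "g" wl &&
       PySem.Str.isIn "l" wl && PySem.Str.isIn "e" wl && PySem.Str.len wl == 5 && !(w == "angle") then
      (if f.contains w then f else f ++ [w])
    else f) []
  (a, b, c, d, e, f)

-- ===== PORT B =====
-- B's single loop body: updates the six result lists for one word.
def wsStep (st : List String × List String × List String × List String × List String × List String)
    (w : String) : List String × List String × List String × List String × List String × List String :=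
  match st with
  | (a, b, c, d, e, f) =>
    let n := PySem.Str.len w
    (if n == 17 then a ++ [w] else a,
     if decide (18 ≤ n) then b ++ [w] else b,
     if PySem.Str.count w "a" + PySem.Str.count w "A" == 4 then c ++ [w] else c,
     if decide (2 ≤ PySem.Str.count w "q" + PySem.Str.count w "Q") then d ++ [w] else d,
     if PySem.Str.isIn "cie" w then e ++ [w] else e,
     if PySem.List.sorted (PySem.Str.lower w).toList (fun x => x) false == ['a', 'e', 'g', 'l', 'n']
        && !(w == "angle") && !(f.contains w) then f ++ [w] else f)

def word_sort_alt (words : List String) : List String × List String × List String × List String × List String × List String :=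
  words.foldl wsStep ([], [], [], [], [], [])

-- ===== PRECONDITION & SPEC =====
def Spec_word_sort (words : List String) (out : List String × List String × List String × List String × List String × List String) : Prop := out = word_sort_alt words
instance (words : List String) (out : List String × List String × List String × List String × List String × List String) : Decidable (Spec_word_sort words out) := by unfold Spec_word_sort; infer_instance

-- ===== CLAIM (what is proved, stated in full; the proofs are below) =====
def Claim_equal_word_sort : Prop := ∀ (words : List String), Dom_word_sort words → Spec_word_sort words (word_sort words)

-- ===== LEMMAS AND PROOFS =====

-- B's fold over a 6-tuple splits into six independent folds, one per result list.
theorem foldl_wsStep (words : List String) (a b c d e f : List String) :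
    words.foldl wsStep (a, b, c, d, e, f) =
    (words.foldl (fun a w => if PySem.Str.len w == 17 then a ++ [w] else a) a,
     words.foldl (fun b w => if decide (18 ≤ PySem.Str.len w) then b ++ [w] else b) b,
     words.foldl (fun c w => if PySem.Str.count w "a" + PySem.Str.count w "A" == 4 then c ++ [w] else c) c,
     words.foldl (fun d w => if decide (2 ≤ PySem.Str.count w "q" + PySem.Str.count w "Q") then d ++ [w] else d) d,
     words.foldl (fun e w => if PySem.Str.isIn "cie" w then e ++ [w] else e) e,
     words.foldl (fun f w =>
       if PySem.List.sorted (PySem.Str.lower w).toList (fun x => x) false == ['a', 'e', 'g', 'l', 'n']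
          && !(w == "angle") && !(f.contains w) then f ++ [w] else f) f) := by
  induction words generalizing a b c d e f with
  | nil => rfl
  | cons w ws ih => simp only [List.foldl_cons, wsStep]; exact ih _ _ _ _ _ _

-- PySem.Chars.count with a single-character needle is List.count.
theorem chars_count_go_singleton (c : Char) (fuel : Nat) (l : List Char) (acc : Nat)
    (h : l.length ≤ fuel) : PySem.Chars.count.go [c] fuel l acc = acc + l.count c := by
  induction fuel generalizing l acc with
  | zero =>
    have : l = [] := List.length_eq_zero_iff.mp (Nat.le_zero.mp h)
    subst this; simp [PySem.Chars.count.go]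
  | succ fuel ih =>
    cases l with
    | nil => simp [PySem.Chars.count.go]
    | cons x t =>
      simp only [PySem.Chars.count.go]
      by_cases hx : c = x
      · rw [if_pos (by subst hx; simp [List.isPrefixOf])]
        show PySem.Chars.count.go [c] fuel ((x :: t).drop 1) (acc + 1) = acc + (x :: t).count c
        rw [List.drop_one, List.tail_cons, ih t (acc + 1) (by simpa using h)]
        subst hx; simp; omega
      · rw [if_neg (by simp [List.isPrefixOf]; exact fun hh => hx hh)]
        show PySem.Chars.count.go [c] fuel t acc = acc + (x :: t).count c
        rw [ih t acc (by simpa using h)]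
        simp [Ne.symm hx]

theorem chars_count_singleton (l : List Char) (c : Char) :
    PySem.Chars.count l [c] = l.count c := by
  simp only [PySem.Chars.count, List.isEmpty_cons, Bool.false_eq_true, if_false]
  simpa using chars_count_go_singleton c l.length l 0 le_rfl

-- one pass counting 'u or v' = count u + count v (for distinct u, v)
theorem countP_two_chars (l : List Char) (u v : Char) (huv : u ≠ v) :
    l.countP (fun x => x == u || x == v) = l.count u + l.count v := by
  induction l with
  | nil => simp
  | cons x t ih =>
    simp only [List.countP_cons, List.count_cons, ih]
    by_cases h1 : x = u <;> by_cases h2 : x = v <;> simp_all <;> omega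

-- A's 4-a's condition coincides with B's
theorem cond_c (w : String) :
    ((0 + ((w.toList.countP (fun letter => letter == 'a' || letter == 'A')) : Int)) == 4)
    = (PySem.Str.count w "a" + PySem.Str.count w "A" == 4) := by
  rw [Bool.eq_iff_iff]
  simp only [beq_iff_eq, PySem.Str.count_eq]
  have h1 : ("a" : String).toList = ['a'] := by simp
  have h2 : ("A" : String).toList = ['A'] := by simp
  rw [h1, h2, chars_count_singleton, chars_count_singleton,
    countP_two_chars w.toList 'a' 'A' (by decide)]
  omega

-- A's two-q's condition coincides with B's
theorem cond_d (w : String) :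
    (decide (2 ≤ (0 + ((w.toList.countP (fun letter => letter == 'q' || letter == 'Q')) : Int))))
    = (decide (2 ≤ PySem.Str.count w "q" + PySem.Str.count w "Q")) := by
  rw [Bool.eq_iff_iff]
  simp only [decide_eq_true_eq, PySem.Str.count_eq]
  have h1 : ("q" : String).toList = ['q'] := by simp
  have h2 : ("Q" : String).toList = ['Q'] := by simp
  rw [h1, h2, chars_count_singleton, chars_count_singleton,
    countP_two_chars w.toList 'q' 'Q' (by decide)]
  omega

-- a length-5 list sorts to "aegln" iff it has the five letters of "angle" (pigeonhole)
theorem anagram_iff (l : List Char) :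
    (PySem.List.sorted l (fun x => x) false = ['a', 'e', 'g', 'l', 'n']) ↔
    ('a' ∈ l ∧ 'n' ∈ l ∧ 'g' ∈ l ∧ 'l' ∈ l ∧ 'e' ∈ l ∧ l.length = 5) := by
  have ht : PySem.List.sorted ['a', 'n', 'g', 'l', 'e'] (fun x : Char => x) false
      = ['a', 'e', 'g', 'l', 'n'] := by decide
  rw [← ht, PySem.List.sorted_id_eq_sorted_id_iff_perm]
  constructor
  · intro h
    refine ⟨h.mem_iff.mpr (by decide), h.mem_iff.mpr (by decide), h.mem_iff.mpr (by decide),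
      h.mem_iff.mpr (by decide), h.mem_iff.mpr (by decide), by simpa using h.length_eq⟩
  · rintro ⟨ha, hn, hg, hl, he, hlen⟩
    have hsub : (['a', 'n', 'g', 'l', 'e'] : List Char) ⊆ l := by
      intro x hx; fin_cases hx <;> assumption
    have hsp := List.subperm_of_subset (by decide) hsub
    exact (hsp.perm_of_length_le (by simp [hlen])).symm

-- A's anagram condition coincides with B's
theorem cond_f (w : String) :
    (PySem.Str.isIn "a" (PySem.Str.lower w) && PySem.Str.isIn "n" (PySem.Str.lower w) &&
     PySem.Str.isIn "g" (PySem.Str.lower w) && PySem.Str.isIn "l" (PySem.Str.lower w) &&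
     PySem.Str.isIn "e" (PySem.Str.lower w) && PySem.Str.len (PySem.Str.lower w) == 5 &&
     !(w == "angle"))
    = (PySem.List.sorted (PySem.Str.lower w).toList (fun x => x) false == ['a', 'e', 'g', 'l', 'n']
       && !(w == "angle")) := by
  rw [Bool.eq_iff_iff]
  simp only [Bool.and_eq_true, beq_iff_eq, PySem.Str.isIn_iff_infix, PySem.Str.len_eq,
    anagram_iff, String.reduceToList, List.singleton_infix_iff]
  constructor
  · rintro ⟨⟨⟨⟨⟨⟨ha, hn⟩, hg⟩, hl⟩, he⟩, hlen⟩, hang⟩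
    exact ⟨⟨ha, hn, hg, hl, he, by exact_mod_cast hlen⟩, hang⟩
  · rintro ⟨⟨ha, hn, hg, hl, he, hlen⟩, hang⟩
    exact ⟨⟨⟨⟨⟨⟨ha, hn⟩, hg⟩, hl⟩, he⟩, by exact_mod_cast hlen⟩, hang⟩

theorem word_sort_eq (words : List String) : word_sort words = word_sort_alt words := by
  unfold word_sort word_sort_alt
  rw [foldl_wsStep]
  simp only [Prod.mk.injEq]
  refine ⟨?_, ?_, ?_, ?_, ?_, ?_⟩
  · rw [PySem.List.foldl_append_if]; simp
  · rw [PySem.List.foldl_append_if]; simp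
  · refine PySem.List.foldl_congr_mem _ _ _ _ ?_
    intro acc w _
    dsimp only
    rw [PySem.List.foldl_if_add_one, cond_c]
  · refine PySem.List.foldl_congr_mem _ _ _ _ ?_
    intro acc w _
    dsimp only
    rw [PySem.List.foldl_if_add_one, cond_d]
  · rw [PySem.List.foldl_append_if]
    simp only [List.map_id_fun', List.nil_append, id]
  · refine PySem.List.foldl_congr_mem _ _ _ _ ?_
    intro acc w _
    dsimp only
    rw [cond_f]
    cases h1 : (PySem.List.sorted (PySem.Str.lower w).toList (fun x => x) false
        == ['a', 'e', 'g', 'l', 'n'] && !(w == "angle")) <;>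
      cases h2 : acc.contains w <;> simp_all

-- ===== VERDICT (by name: the statement is the Claim_ definition above) =====
theorem word_sort_spec : Claim_equal_word_sort := fun words _ => word_sort_eq words
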